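-- pv_equiv track=rewrite | github.com/andykr1k/NTILC | evaluation/metrics.py | collapse_raw_tool_records
-- ===== SOURCE A (Python) =====
-- from typing import Any, Dict, Iterable, List, Mapping, Optional, Sequence, Tuple
--
-- def collapse_raw_tool_records(raw_rows: Iterable[Mapping[str, Any]]) -> List[Dict[str, str]]:
--     collapsed: Dict[str, Dict[str, str]] = {}
--     for row in raw_rows:
--         if not isinstance(row, Mapping):
--             continue
--         name = str(row.get("name", "")).strip()
--         if not name:
--             continue
--
--         current = collapsed.get(
--             name,
--             {
--                 "name": name,
--                 "one_line": "",
--                 "invocation": "",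
--                 "source_url": "",
--             },
--         )
--         one_line = str(row.get("one_line", "") or "").strip()
--         invocation = str(row.get("invocation", "") or "").strip()
--         source_url = str(row.get("source_url", "") or "").strip()
--
--         if len(one_line) > len(current["one_line"]):
--             current["one_line"] = one_line
--         if len(invocation) > len(current["invocation"]):
--             current["invocation"] = invocation
--         if source_url and not current["source_url"]:
--             current["source_url"] = source_url
--
--         collapsed[name] = current
--
--     return [collapsed[name] for name in sorted(collapsed.keys())]
-- ===== SOURCE B (Python) =====
-- from typing import Any, Dict, Iterable, List, Mapping, Tuple
--
-- def collapse_raw_tool_records(raw_rows: Iterable[Mapping[str, Any]]) -> List[Dict[str, str]]: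
--     # Group-then-reduce: one pass collecting cleaned triples per name, then one reduce per group.
--     groups: Dict[str, List[Tuple[str, str, str]]] = {}
--     for row in raw_rows:
--         if not isinstance(row, Mapping):
--             continue
--         name = str(row.get("name", "")).strip()
--         if not name:
--             continue
--         groups.setdefault(name, []).append((
--             str(row.get("one_line", "") or "").strip(),
--             str(row.get("invocation", "") or "").strip(),
--             str(row.get("source_url", "") or "").strip(),
--         ))
--     return [
--         {
--             "name": name,
--             "one_line": max((t[0] for t in triples), key=len, default=""),
--             "invocation": max((t[1] for t in triples), key=len, default=""),
--             "source_url": next((t[2] for t in triples if t[2]), ""),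
--         }
--         for name, triples in sorted(groups.items())
--     ]
-- ===== Notes on version B (the rewrite author's own statement) =====
-- stated objective: alternative
-- what changed: B replaces A's single-pass incremental running-best dict of records with a group-then-reduce decomposition: one pass collects each row's cleaned triple into a dict of lists keyed by name, then each group is reduced with max(key=len, default='') for one_line/invocation and next(first non-empty) for source_url.
import Mathlib
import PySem

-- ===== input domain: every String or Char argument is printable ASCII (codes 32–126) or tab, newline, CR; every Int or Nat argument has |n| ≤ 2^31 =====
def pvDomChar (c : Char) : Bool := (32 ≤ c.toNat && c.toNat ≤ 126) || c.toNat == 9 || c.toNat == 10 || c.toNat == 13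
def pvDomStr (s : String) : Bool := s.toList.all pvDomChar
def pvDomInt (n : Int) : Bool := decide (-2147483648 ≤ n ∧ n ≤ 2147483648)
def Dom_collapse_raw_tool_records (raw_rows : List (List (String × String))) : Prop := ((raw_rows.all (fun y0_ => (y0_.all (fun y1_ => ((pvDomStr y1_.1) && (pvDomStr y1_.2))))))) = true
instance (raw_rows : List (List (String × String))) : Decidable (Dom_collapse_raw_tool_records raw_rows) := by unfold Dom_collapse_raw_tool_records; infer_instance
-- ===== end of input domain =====

-- B is an alternative (group-then-reduce) decomposition of A's single-pass running-best collapse; equal output, similar cost.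
-- Shared reading of one field of a row: str(row.get(k, "") or "").strip().
-- On the typed domain every value is already a str, so str(...) and `or ""` are identity; row.get = first-match lookup.
def pvGet (row : List (String × String)) (k : String) : String :=
  PySem.Str.strip ((PySem.Dict.mk row).getD k "")

-- the cleaned (one_line, invocation, source_url) triple of a row
def pvTriple (row : List (String × String)) : String × String × String :=
  (pvGet row "one_line", pvGet row "invocation", pvGet row "source_url")

-- ===== PORT A =====
-- the three `if` statements of A's loop body, one helper each (current[...] is getD: the key is always present)
def pvA_upd1 (current : PySem.Dict String String) (one_line : String) : PySem.Dict String String :=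
  if PySem.Str.len one_line > PySem.Str.len (current.getD "one_line" "") then current.insert "one_line" one_line else current

def pvA_upd2 (current : PySem.Dict String String) (invocation : String) : PySem.Dict String String :=
  if PySem.Str.len invocation > PySem.Str.len (current.getD "invocation" "") then current.insert "invocation" invocation else current

def pvA_upd3 (current : PySem.Dict String String) (source_url : String) : PySem.Dict String String :=
  if source_url ≠ "" ∧ current.getD "source_url" "" = "" then current.insert "source_url" source_url else current

-- one iteration of A's loop (isinstance(row, Mapping) is always true on the typed domain)
def pvA_step (collapsed : PySem.Dict String (PySem.Dict String String)) (row : List (String × String)) :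
    PySem.Dict String (PySem.Dict String String) :=
  let name := pvGet row "name"
  if name = "" then collapsed
  else
    collapsed.insert name
      (pvA_upd3
        (pvA_upd2
          (pvA_upd1
            (collapsed.getD name (PySem.Dict.mk [("name", name), ("one_line", ""), ("invocation", ""), ("source_url", "")]))
            (pvGet row "one_line"))
          (pvGet row "invocation"))
        (pvGet row "source_url"))

def collapse_raw_tool_records (raw_rows : List (List (String × String))) : List (List (String × String)) :=
  let collapsed := raw_rows.foldl pvA_step PySem.Dict.empty
  -- [collapsed[name] for name in sorted(collapsed.keys())]; name ∈ keys, so the getD default is never read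
  (PySem.List.sorted collapsed.keys (fun k => k) false).map (fun n => (collapsed.getD n PySem.Dict.empty).items)

-- ===== PORT B =====
-- one iteration of B's grouping loop: groups.setdefault(name, []).append(triple)
def pvB_step (groups : PySem.Dict String (List (String × String × String))) (row : List (String × String)) :
    PySem.Dict String (List (String × String × String)) :=
  let name := pvGet row "name"
  if name = "" then groups
  else groups.modify name [] (fun l => l ++ [pvTriple row])

def collapse_raw_tool_records_alt (raw_rows : List (List (String × String))) : List (List (String × String)) :=
  let groups := raw_rows.foldl pvB_step PySem.Dict.empty
  -- sorted(groups.items()): keys are distinct, so Python's tuple sort is a sort by the name component;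
  -- each record is a dict literal with distinct literal keys = its item list
  (PySem.List.sorted groups.items (fun p => p.1) false).map (fun p =>
    [("name", p.1),
     ("one_line", PySem.List.maxD (p.2.map (fun t => t.1)) PySem.Str.len ""),
     ("invocation", PySem.List.maxD (p.2.map (fun t => t.2.1)) PySem.Str.len ""),
     ("source_url", ((p.2.map (fun t => t.2.2)).find? (fun u => !(u == ""))).getD "")])

-- ===== PRECONDITION & SPEC =====
def Spec_collapse_raw_tool_records (raw_rows : List (List (String × String))) (out : List (List (String × String))) : Prop := out = collapse_raw_tool_records_alt raw_rows
instance (raw_rows : List (List (String × String))) (out : List (List (String × String))) : Decidable (Spec_collapse_raw_tool_records raw_rows out) := by unfold Spec_collapse_raw_tool_records; infer_instance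

-- ===== CLAIM (what is proved, stated in full; the proofs are below) =====
def Claim_equal_collapse_raw_tool_records : Prop := ∀ (raw_rows : List (List (String × String))), Dom_collapse_raw_tool_records raw_rows → Spec_collapse_raw_tool_records raw_rows (collapse_raw_tool_records raw_rows)

-- ===== LEMMAS AND PROOFS =====

def pvMkRec (n o i u : String) : PySem.Dict String String :=
  PySem.Dict.mk [("name", n), ("one_line", o), ("invocation", i), ("source_url", u)]


theorem pvMkRec_getD (n o i u k d : String) :
    (pvMkRec n o i u).getD k d =
      if "name" = k then n else if "one_line" = k then o else if "invocation" = k then i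
      else if "source_url" = k then u else d := by
  simp only [pvMkRec, PySem.Dict.getD, PySem.Dict.get?_mk_cons]
  split_ifs with h1 h2 h3 h4 <;> simp_all [beq_iff_eq, PySem.Dict.get?]

theorem pvUpd1_mkRec (n o i u x : String) :
    pvA_upd1 (pvMkRec n o i u) x = pvMkRec n (if PySem.Str.len x > PySem.Str.len o then x else o) i u := by
  rw [pvA_upd1, pvMkRec_getD]; simp only [reduceIte, String.reduceEq]; split_ifs with h1 <;> rfl

theorem pvUpd2_mkRec (n o i u x : String) :
    pvA_upd2 (pvMkRec n o i u) x = pvMkRec n o (if PySem.Str.len x > PySem.Str.len i then x else i) u := by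
  rw [pvA_upd2, pvMkRec_getD]; simp only [reduceIte, String.reduceEq]; split_ifs with h1 <;> rfl

theorem pvUpd3_mkRec (n o i u x : String) :
    pvA_upd3 (pvMkRec n o i u) x = pvMkRec n o i (if x ≠ "" ∧ u = "" then x else u) := by
  rw [pvA_upd3, pvMkRec_getD]; simp only [reduceIte, String.reduceEq]; split_ifs with h1 <;> rfl

def pvUpdT (c : PySem.Dict String String) (t : String × String × String) : PySem.Dict String String :=
  pvA_upd3 (pvA_upd2 (pvA_upd1 c t.1) t.2.1) t.2.2

def pvFO (o : String) (ts : List (String × String × String)) : String :=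
  ts.foldl (fun c t => if PySem.Str.len t.1 > PySem.Str.len c then t.1 else c) o
def pvFI (i : String) (ts : List (String × String × String)) : String :=
  ts.foldl (fun c t => if PySem.Str.len t.2.1 > PySem.Str.len c then t.2.1 else c) i
def pvFU (u : String) (ts : List (String × String × String)) : String :=
  ts.foldl (fun c t => if t.2.2 ≠ "" ∧ c = "" then t.2.2 else c) u

theorem pvUpdT_fold (ts : List (String × String × String)) : ∀ (n o i u : String),
    ts.foldl pvUpdT (pvMkRec n o i u) = pvMkRec n (pvFO o ts) (pvFI i ts) (pvFU u ts) := by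
  induction ts with
  | nil => intro n o i u; rfl
  | cons t ts ih =>
    intro n o i u
    simp only [List.foldl_cons, pvFO, pvFI, pvFU]
    rw [show pvUpdT (pvMkRec n o i u) t = pvMkRec n (if PySem.Str.len t.1 > PySem.Str.len o then t.1 else o)
        (if PySem.Str.len t.2.1 > PySem.Str.len i then t.2.1 else i) (if t.2.2 ≠ "" ∧ u = "" then t.2.2 else u) from ?_, ih]
    · rfl
    · rw [pvUpdT, pvUpd1_mkRec, pvUpd2_mkRec, pvUpd3_mkRec]

def pvStepIns (d : PySem.Dict String (PySem.Dict String String)) (p : String × String × String × String) :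
    PySem.Dict String (PySem.Dict String String) :=
  d.insert p.1 (pvUpdT (d.getD p.1 (pvMkRec p.1 "" "" "")) p.2)

def pvRows (l : List (List (String × String))) : List (String × String × String × String) :=
  (l.filter (fun r => !decide (pvGet r "name" = ""))).map (fun r => (pvGet r "name", pvTriple r))

def pvGrp (ps : List (String × String × String × String)) (n : String) : List (String × String × String) :=
  (ps.filter (fun p => p.1 == n)).map (fun p => p.2)

def pvVal (ps : List (String × String × String × String)) (n : String) : PySem.Dict String String :=
  (pvGrp ps n).foldl pvUpdT (pvMkRec n "" "" "")

def pvD (ps : List (String × String × String × String)) : PySem.Dict String (PySem.Dict String String) :=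
  PySem.Dict.mk ((PySem.Set.ofList (ps.map (fun p => p.1))).map (fun n => (n, pvVal ps n)))

theorem pvGrp_append (ps : List (String × String × String × String)) (p : String × String × String × String) (n : String) :
    pvGrp (ps ++ [p]) n = pvGrp ps n ++ (if p.1 = n then [p.2] else []) := by
  by_cases h : p.1 = n <;> simp [pvGrp, List.filter_append, h]

theorem pvVal_append_self (ps : List (String × String × String × String)) (p : String × String × String × String) :
    pvVal (ps ++ [p]) p.1 = pvUpdT (pvVal ps p.1) p.2 := by
  simp [pvVal, pvGrp_append, List.foldl_append]

theorem pvVal_append_ne (ps : List (String × String × String × String)) (p : String × String × String × String)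
    (k : String) (h : k ≠ p.1) : pvVal (ps ++ [p]) k = pvVal ps k := by
  simp [pvVal, pvGrp_append, Ne.symm h]

theorem pvD_keys (ps : List (String × String × String × String)) :
    (pvD ps).keys = PySem.Set.ofList (ps.map (fun p => p.1)) := by
  simp [pvD, PySem.Dict.keys, Function.comp_def]

theorem pvD_keys_nodup (ps : List (String × String × String × String)) : (pvD ps).keys.Nodup := by
  rw [pvD_keys]; exact PySem.Set.nodup_ofList _

theorem pvD_getD_mem (ps : List (String × String × String × String)) (n : String)
    (h : n ∈ ps.map (fun p => p.1)) (d0 : PySem.Dict String String) : (pvD ps).getD n d0 = pvVal ps n := by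
  apply PySem.Dict.getD_of_mem_items _ _ (pvD_keys_nodup ps)
  exact List.mem_map.mpr ⟨n, (PySem.Set.mem_ofList _ _).mpr h, rfl⟩

theorem pvD_contains (ps : List (String × String × String × String)) (n : String) :
    (pvD ps).contains n = decide (n ∈ ps.map (fun p => p.1)) := by
  rw [PySem.Dict.contains_eq_decide_mem_keys, pvD_keys]
  simp [PySem.Set.mem_ofList]

theorem pvSet_append (l : List String) (x : String) :
    PySem.Set.ofList (l ++ [x]) = PySem.Set.add (PySem.Set.ofList l) x := by
  simp [PySem.Set.ofList, List.foldl_append]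

-- A's dict after processing ps is the group-by normal form pvD ps
theorem pvA_fold_normal (ps : List (String × String × String × String)) :
    ps.foldl pvStepIns PySem.Dict.empty = pvD ps := by
  induction ps using List.reverseRecOn with
  | nil => rfl
  | append_singleton ps p ih =>
    rw [List.foldl_append, List.foldl_cons, List.foldl_nil, ih]
    by_cases h : p.1 ∈ ps.map (fun q => q.1)
    · -- existing key: in-place overwrite
      apply PySem.Dict.ext
      rw [pvStepIns, pvD_getD_mem ps p.1 h,
          PySem.Dict.items_insert_of_contains _ _ (by rw [pvD_contains]; exact decide_eq_true h)]
      simp only [pvD, List.map_map, List.map_append, List.map_cons, List.map_nil, pvSet_append,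
        PySem.Set.add_of_mem ((PySem.Set.mem_ofList _ _).mpr h)]
      apply List.map_congr_left
      intro k hk
      by_cases hkp : k = p.1
      · subst hkp; simp [pvVal_append_self]
      · simp [Function.comp, hkp, pvVal_append_ne ps p k hkp]
    · -- fresh key: append
      apply PySem.Dict.ext
      rw [pvStepIns,
          PySem.Dict.getD_of_not_contains _ _ (by rw [pvD_contains]; exact decide_eq_false h),
          PySem.Dict.items_insert_of_not_contains _ _ (by rw [pvD_contains]; exact decide_eq_false h)]
      have hgrp : pvGrp ps p.1 = [] := by
        simp only [pvGrp, List.map_eq_nil_iff, List.filter_eq_nil_iff]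
        intro q hq hbeq
        exact h (List.mem_map.mpr ⟨q, hq, by simpa [beq_iff_eq] using hbeq⟩)
      simp only [pvD, List.map_append, List.map_cons, List.map_nil, pvSet_append,
        PySem.Set.add_of_not_mem (fun hc => h ((PySem.Set.mem_ofList _ _).mp hc))]
      congr 1
      · apply List.map_congr_left
        intro k hk
        have hkp : k ≠ p.1 := fun he => h (he ▸ (PySem.Set.mem_ofList _ _).mp hk)
        simp [pvVal_append_ne ps p k hkp]
      · simp [pvVal, pvGrp_append, hgrp]

theorem pvFoldl_skip {α β : Type} (p : α → Prop) [DecidablePred p] (f : β → α → β) (l : List α) (init : β) :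
    l.foldl (fun acc x => if p x then acc else f acc x) init
      = (l.filter (fun x => !decide (p x))).foldl f init := by
  induction l generalizing init with
  | nil => rfl
  | cons x t ih => by_cases h : p x <;> simp [h, ih]

theorem pvA_fold_eq_rows (raw_rows : List (List (String × String))) :
    raw_rows.foldl pvA_step PySem.Dict.empty = (pvRows raw_rows).foldl pvStepIns PySem.Dict.empty := by
  unfold pvRows
  rw [List.foldl_map,
    ← pvFoldl_skip (fun r => pvGet r "name" = "") (fun d r => pvStepIns d (pvGet r "name", pvTriple r))]
  rfl

def pvStepGrp (g : PySem.Dict String (List (String × String × String))) (p : String × String × String × String) :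
    PySem.Dict String (List (String × String × String)) :=
  g.modify p.1 [] (fun l => l ++ [p.2])

theorem pvB_fold_eq_rows (raw_rows : List (List (String × String))) :
    raw_rows.foldl pvB_step PySem.Dict.empty = (pvRows raw_rows).foldl pvStepGrp PySem.Dict.empty := by
  unfold pvRows
  rw [List.foldl_map,
    ← pvFoldl_skip (fun r => pvGet r "name" = "") (fun g r => pvStepGrp g (pvGet r "name", pvTriple r))]
  rfl

theorem pvG_getD (ps : List (String × String × String × String)) (n : String) :
    (ps.foldl pvStepGrp PySem.Dict.empty).getD n [] = pvGrp ps n := by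
  have := PySem.Dict.getD_foldl_modify_append ps (PySem.Dict.empty (κ := String) (ν := List (String × String × String))) n
  simpa [pvStepGrp, pvGrp] using this

theorem pvG_keys (ps : List (String × String × String × String)) :
    (ps.foldl pvStepGrp PySem.Dict.empty).keys = PySem.Set.ofList (ps.map (fun p => p.1)) := by
  have := PySem.Dict.keys_foldl_modify_key ps (fun p => p.1) ([] : List (String × String × String))
    (fun _ p => fun l => l ++ [p.2]) PySem.Dict.empty
  simpa [pvStepGrp, PySem.Dict.keys_empty] using this

theorem pvG_nodup (ps : List (String × String × String × String)) :
    (ps.foldl pvStepGrp PySem.Dict.empty).keys.Nodup := by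
  have := PySem.Dict.nodup_keys_foldl_modify_key ps (fun p => p.1) ([] : List (String × String × String))
    (fun _ p => fun l => l ++ [p.2]) PySem.Dict.empty (by simp [PySem.Dict.keys_empty])
  simpa [pvStepGrp] using this

theorem pvG_items (ps : List (String × String × String × String)) :
    (ps.foldl pvStepGrp PySem.Dict.empty).items
      = (PySem.Set.ofList (ps.map (fun p => p.1))).map (fun k => (k, pvGrp ps k)) := by
  rw [PySem.Dict.items_eq_map_keys _ (pvG_nodup ps) [], pvG_keys]
  exact List.map_congr_left (fun k _ => by rw [pvG_getD])

theorem pvSorted_map (ns : List String) (w : String → List (String × String × String)) :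
    PySem.List.sorted ((PySem.Set.ofList ns).map (fun k => (k, w k))) (fun p => p.1) false
      = (PySem.List.sorted (PySem.Set.ofList ns) (fun k => k) false).map (fun k => (k, w k)) := by
  apply PySem.List.sorted_eq_of_perm_of_pairwise_lt
  · exact (PySem.List.sorted_perm _ _ _).map _
  · rw [List.pairwise_map]
    have hle := PySem.List.sorted_pairwise (PySem.Set.ofList ns) (fun k => k)
    have hnd : (PySem.List.sorted (PySem.Set.ofList ns) (fun k => k) false).Nodup :=
      ((PySem.List.sorted_perm _ _ _).nodup_iff).mpr (PySem.Set.nodup_ofList _)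
    exact (hle.and hnd).imp (fun h => lt_of_le_of_ne h.1 h.2)

theorem pvStr_eq_empty (x : String) (h : ¬ PySem.Str.len "" < PySem.Str.len x) : x = "" := by
  have hx := PySem.Str.len_eq x
  have h0 := PySem.Str.len_eq ""
  have : x.toList.length = 0 := by
    simp only [String.toList_empty, List.length_nil, Nat.cast_zero] at h0
    omega
  have : x.toList = [] := List.length_eq_zero_iff.mp this
  exact String.toList_eq_nil_iff.mp this

def pvMaxStep : Option String → String → Option String := fun acc x =>
  match acc with
  | none => some x
  | some m => if PySem.Str.len m < PySem.Str.len x then some x else some m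

theorem pvMax?_eq_foldl (xs : List String) : PySem.List.max? xs PySem.Str.len = xs.foldl pvMaxStep none := by
  rw [PySem.List.max?]
  apply PySem.List.foldl_congr_mem
  intro acc x _
  cases acc <;> rfl

theorem pvOptFold (xs : List String) : ∀ (a : String),
    xs.foldl pvMaxStep (some a)
      = some (xs.foldl (fun c x => if PySem.Str.len c < PySem.Str.len x then x else c) a) := by
  induction xs with
  | nil => intro a; rfl
  | cons x t ih =>
    intro a
    rw [List.foldl_cons, List.foldl_cons]
    show List.foldl pvMaxStep (if PySem.Str.len a < PySem.Str.len x then some x else some a) t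
        = some (List.foldl _ (if PySem.Str.len a < PySem.Str.len x then x else a) t)
    by_cases h : PySem.Str.len a < PySem.Str.len x
    · rw [if_pos h, if_pos h]; exact ih x
    · rw [if_neg h, if_neg h]; exact ih a

theorem pvMaxD_eq (xs : List String) :
    PySem.List.maxD xs PySem.Str.len ""
      = xs.foldl (fun c x => if PySem.Str.len x > PySem.Str.len c then x else c) "" := by
  simp only [gt_iff_lt]
  cases xs with
  | nil => rfl
  | cons x t =>
    rw [PySem.List.maxD, pvMax?_eq_foldl, List.foldl_cons]
    show (t.foldl pvMaxStep (some x)).getD "" = _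
    rw [pvOptFold t x, Option.getD_some, List.foldl_cons]
    show _ = t.foldl _ (if PySem.Str.len "" < PySem.Str.len x then x else "")
    by_cases h : PySem.Str.len "" < PySem.Str.len x
    · rw [if_pos h]
    · rw [if_neg h, pvStr_eq_empty x h]

theorem pvFoldU_frozen (xs : List String) : ∀ (c : String), c ≠ "" →
    xs.foldl (fun c x => if x ≠ "" ∧ c = "" then x else c) c = c := by
  induction xs with
  | nil => intro c _; rfl
  | cons x t ih => intro c hc; rw [List.foldl_cons, if_neg (fun h => hc h.2)]; exact ih c hc

theorem pvFind_eq (xs : List String) :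
    xs.foldl (fun c x => if x ≠ "" ∧ c = "" then x else c) ""
      = (xs.find? (fun u => !(u == ""))).getD "" := by
  induction xs with
  | nil => rfl
  | cons x t ih =>
    by_cases h : x = ""
    · subst h; simpa using ih
    · show List.foldl _ (if x ≠ "" ∧ ("" : String) = "" then x else "") t = ((x :: t).find? (fun u => !(u == ""))).getD ""
      rw [if_pos ⟨h, rfl⟩, pvFoldU_frozen t x h, List.find?_cons_of_pos (by simpa using h)]
      rfl

theorem pvMain (raw_rows : List (List (String × String))) :
    collapse_raw_tool_records raw_rows = collapse_raw_tool_records_alt raw_rows := by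
  simp only [collapse_raw_tool_records, collapse_raw_tool_records_alt]
  rw [pvA_fold_eq_rows, pvB_fold_eq_rows, pvA_fold_normal, pvD_keys, pvG_items, pvSorted_map,
    List.map_map]
  apply List.map_congr_left
  intro k hk
  have hmem : k ∈ (pvRows raw_rows).map (fun p => p.1) :=
    (PySem.Set.mem_ofList _ _).mp ((PySem.List.mem_sorted _ _ _ _).mp hk)
  rw [Function.comp_apply, pvD_getD_mem _ _ hmem, pvVal, pvUpdT_fold]
  simp only [pvMkRec]
  rw [pvMaxD_eq, pvMaxD_eq, ← pvFind_eq, List.foldl_map, List.foldl_map, List.foldl_map]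
  rfl

-- ===== VERDICT (by name: the statement is the Claim_ definition above) =====
theorem collapse_raw_tool_records_spec : Claim_equal_collapse_raw_tool_records := by
  intro raw_rows _
  exact pvMain raw_rows
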